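-- pv_equiv track=rewrite | github.com/sglee487/Coding-test | Backjoon/6987-월드컵-2.py | dfs
-- ===== SOURCE A (Python) =====
-- from itertools import combinations
--
-- fights = list(combinations([0,1,2,3,4,5],2))
--
-- def dfs(round, teams):
--     if round == 15:
--         return not any(map(any, teams))
--
--     team1 = fights[round][0]
--     team2 = fights[round][1]
--
--     ret = False
--
--     if teams[team1][0] and teams[team2][2]:
--         teams[team1][0] -= 1
--         teams[team2][2] -= 1
--         ret = ret or dfs(round+1, teams)
--         teams[team1][0] += 1
--         teams[team2][2] += 1
--
--     if teams[team1][1] and teams[team2][1]: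
--         teams[team1][1] -= 1
--         teams[team2][1] -= 1
--         ret = ret or dfs(round+1, teams)
--         teams[team1][1] += 1
--         teams[team2][1] += 1
--
--     if teams[team1][2] and teams[team2][0]:
--         teams[team1][2] -= 1
--         teams[team2][0] -= 1
--         ret = ret or dfs(round+1, teams)
--         teams[team1][2] += 1
--         teams[team2][0] += 1
--
--     return ret
-- ===== SOURCE B (Python) =====
-- from itertools import combinations
--
-- fights = list(combinations([0, 1, 2, 3, 4, 5], 2))
--
-- def dfs(round, teams):
--     # Explicit-stack DFS over immutable copied states (no mutation of the caller's list).
--     stack = [(round, [list(row) for row in teams])]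
--     while stack:
--         r, state = stack.pop()
--         if r == 15:
--             if not any(map(any, state)):
--                 return True
--             continue
--         t1, t2 = fights[r]
--         for i, j in ((0, 2), (1, 1), (2, 0)):
--             if state[t1][i] and state[t2][j]:
--                 new = [list(row) for row in state]
--                 new[t1][i] -= 1
--                 new[t2][j] -= 1
--                 stack.append((r + 1, new))
--     return False
-- ===== Notes on version B (the rewrite author's own statement) =====
-- stated objective: alternative
-- what changed: Recursive backtracking with in-place decrement/restore is replaced by an explicit-stack DFS over immutable copied states (pop a (round,state) pair, push the up-to-three decremented successor states), which never mutates the caller's list.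
-- outside the precondition, e.g. on dfs(14, [[0], [0], [0], [0], [0, 0, 0], [0, 0, 0]]): A returns False, B returns False
import Mathlib
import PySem

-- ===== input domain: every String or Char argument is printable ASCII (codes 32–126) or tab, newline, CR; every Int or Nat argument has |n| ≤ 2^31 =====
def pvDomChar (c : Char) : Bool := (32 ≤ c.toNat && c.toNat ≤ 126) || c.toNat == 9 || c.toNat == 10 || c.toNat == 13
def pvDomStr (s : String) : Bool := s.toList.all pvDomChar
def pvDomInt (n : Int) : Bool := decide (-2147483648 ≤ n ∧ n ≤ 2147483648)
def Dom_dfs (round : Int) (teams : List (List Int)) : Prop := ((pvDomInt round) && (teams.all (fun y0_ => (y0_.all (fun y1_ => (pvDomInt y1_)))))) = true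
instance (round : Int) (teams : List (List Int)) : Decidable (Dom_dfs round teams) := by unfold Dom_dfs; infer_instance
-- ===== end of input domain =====

-- B replaces A's recursive in-place backtracking by an explicit-stack DFS over copied
-- states (objective: alternative; same result, and B never mutates the caller's list —
-- A mutates `teams` during the search but restores it before returning, so the
-- equivalence proved here is about the return value).

-- ===== PORT A =====
-- module constant: fights = list(combinations([0,1,2,3,4,5],2))
def fightsList : List (Int × Int) :=
  [(0,1),(0,2),(0,3),(0,4),(0,5),(1,2),(1,3),(1,4),(1,5),(2,3),(2,4),(2,5),(3,4),(3,5),(4,5)]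

-- teams[t][i] (indices here are always the nonnegative literals 0..5 / 0..2 from `fights`;
-- Pre_ guarantees they are in range, so the getD defaults are never reached inside Pre_)
def cellAt (teams : List (List Int)) (t i : Int) : Int :=
  (PySem.List.pyGet? ((PySem.List.pyGet? teams t).getD []) i).getD 0

-- teams[t][i] += d
def addCell (teams : List (List Int)) (t i d : Int) : List (List Int) :=
  teams.modify t.toNat (fun row => row.modify i.toNat (fun x => x + d))

-- one backtracking branch of A: decrement the two cells and recurse on the new state
-- (functional rendering of "decrement, recurse, restore": each branch starts from `teams`)
def dfsA : Nat → Int → List (List Int) → Bool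
  | fuel, round, teams =>
    if round = 15 then
      !(teams.any fun row => row.any fun x => x != 0)
    else
      match fuel with
      | 0 => false
      | fuel + 1 =>
        let ft := (PySem.List.pyGet? fightsList round).getD (0, 0)
        let r1 := if cellAt teams ft.1 0 != 0 && cellAt teams ft.2 2 != 0 then
            dfsA fuel (round + 1) (addCell (addCell teams ft.1 0 (-1)) ft.2 2 (-1)) else false
        let r2 := if cellAt teams ft.1 1 != 0 && cellAt teams ft.2 1 != 0 then
            dfsA fuel (round + 1) (addCell (addCell teams ft.1 1 (-1)) ft.2 1 (-1)) else false
        let r3 := if cellAt teams ft.1 2 != 0 && cellAt teams ft.2 0 != 0 then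
            dfsA fuel (round + 1) (addCell (addCell teams ft.1 2 (-1)) ft.2 0 (-1)) else false
        r1 || r2 || r3

-- fuel (15 - round).toNat is exactly the recursion depth of A, a pure termination device
def dfs (round : Int) (teams : List (List Int)) : Bool :=
  dfsA (15 - round).toNat round teams

-- ===== PORT B =====
-- the three outcome column pairs ((0,2),(1,1),(2,0)) Source B iterates over
def movesB : List (Int × Int) := [(0, 2), (1, 1), (2, 0)]

-- fuel bound on the number of pops: W d ≥ size of a ternary tree of depth d
def fuelW : Nat → Nat
  | 0 => 1
  | n + 1 => 3 * fuelW n + 1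

-- the while loop of Source B; the Lean list is the Python stack with its head = Python's end,
-- so `pop` is head destructuring and `append` during the for loop is the foldl cons
def dfsB : Nat → List (Int × List (List Int)) → Bool
  | 0, _ => false
  | _ + 1, [] => false
  | fuel + 1, (r, state) :: rest =>
    if r = 15 then
      if !(state.any fun row => row.any fun x => x != 0) then true
      else dfsB fuel rest
    else
      let ft := (PySem.List.pyGet? fightsList r).getD (0, 0)
      let stack' := movesB.foldl (fun st m =>
          if cellAt state ft.1 m.1 != 0 && cellAt state ft.2 m.2 != 0 then
            (r + 1, addCell (addCell state ft.1 m.1 (-1)) ft.2 m.2 (-1)) :: st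
          else st) rest
      dfsB fuel stack'

def dfs_alt (round : Int) (teams : List (List Int)) : Bool :=
  -- stack seeded with (round, [list(row) for row in teams])
  dfsB (fuelW (15 - round).toNat) [(round, teams.map (fun row => row.map (fun x => x)))]

-- ===== PRECONDITION & SPEC =====
-- Pre_ excludes the inputs where Python raises IndexError: round outside [-15,15]
-- (fights[round] fails, Python's negative indices wrap) and, for round ≤ 14, boards
-- without six rows of ≥ 3 entries.  For simplicity it also excludes some malformed
-- boards on which A happens to return because falsy cells short-circuit the guards
-- before the missing cells are touched (the exact raise set is value-dependent).
def Pre_dfs (round : Int) (teams : List (List Int)) : Prop :=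
  round = 15 ∨
  (-15 ≤ round ∧ round ≤ 14 ∧ 6 ≤ teams.length ∧ ∀ row ∈ teams.take 6, 3 ≤ row.length)
instance (round : Int) (teams : List (List Int)) : Decidable (Pre_dfs round teams) := by
  unfold Pre_dfs; infer_instance

def pvWitness_dfs : Int × List (List Int) :=
  (13, [[1,0,1],[0,0,0],[0,0,0],[0,0,0],[0,1,0],[1,1,0]])

def Spec_dfs (round : Int) (teams : List (List Int)) (out : Bool) : Prop := out = dfs_alt round teams
instance (round : Int) (teams : List (List Int)) (out : Bool) : Decidable (Spec_dfs round teams out) := by unfold Spec_dfs; infer_instance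

-- ===== CLAIM (what is proved, stated in full; the proofs are below) =====
def Claim_equal_dfs : Prop := ∀ (round : Int) (teams : List (List Int)), Dom_dfs round teams → Pre_dfs round teams → Spec_dfs round teams (dfs round teams)

-- ===== LEMMAS AND PROOFS =====

-- total fuel needed by a stack: one full-tree bound per entry
def stackCost (st : List (Int × List (List Int))) : Nat :=
  (st.map (fun p => fuelW (15 - p.1).toNat)).sum

lemma fuelW_pos (n : Nat) : 1 ≤ fuelW n := by
  cases n with
  | zero => simp [fuelW]
  | succ n => simp only [fuelW]; omega

lemma stackCost_cons (r : Int) (t : List (List Int)) (rest : List (Int × List (List Int))) :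
    stackCost ((r, t) :: rest) = fuelW (15 - r).toNat + stackCost rest := by
  simp [stackCost]

-- main invariant: with enough fuel, the stack loop returns the disjunction of A's
-- answers over the stack entries
set_option maxHeartbeats 3200000 in
lemma dfsB_eval : ∀ (fuel : Nat) (stack : List (Int × List (List Int))),
    (∀ p ∈ stack, p.1 ≤ 15) → stackCost stack ≤ fuel →
    dfsB fuel stack = stack.any (fun p => dfsA (15 - p.1).toNat p.1 p.2) := by
  intro fuel
  induction fuel with
  | zero =>
    intro stack hmem hcost
    match stack with
    | [] => simp [dfsB]
    | (r, t) :: rest =>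
      exfalso
      have h1 := fuelW_pos (15 - r).toNat
      rw [stackCost_cons] at hcost
      omega
  | succ fuel ih =>
    intro stack hmem hcost
    match stack with
    | [] => simp [dfsB]
    | (r, state) :: rest =>
      have hr : r ≤ 15 := hmem (r, state) (by simp)
      have hmemr : ∀ p ∈ rest, p.1 ≤ 15 := fun p hp => hmem p (by simp [hp])
      by_cases h15 : r = 15
      · subst h15
        rw [stackCost_cons] at hcost
        have h1 := fuelW_pos (15 - (15:Int)).toNat
        simp only [dfsB, List.any_cons]
        cases hbase : (state.any fun row => row.any fun x => x != 0) with
        | true =>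
          rw [ih rest hmemr (by omega)]
          simp [dfsA, hbase]
        | false =>
          simp [dfsA, hbase]
      · have hr14 : r ≤ 14 := by omega
        have hk : (15 - r).toNat = (15 - (r + 1)).toNat + 1 := by omega
        rw [stackCost_cons] at hcost
        rw [hk] at hcost
        simp only [fuelW] at hcost
        simp only [dfsB, if_neg h15, movesB, List.foldl, List.any_cons, hk, dfsA]
        split_ifs with g1 g2 g3 <;>
        · rw [ih _ (by
              intro p hp
              try simp only [List.mem_cons] at hp
              first
              | (rcases hp with rfl | rfl | rfl | hp)
              | (rcases hp with rfl | rfl | hp)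
              | (rcases hp with rfl | hp)
              | skip
              all_goals first
              | exact hmemr p hp
              | exact (show (r : Int) + 1 ≤ 15 by omega)) (by
              try simp only [stackCost_cons]
              omega)]
          simp [List.any_cons, Bool.or_comm, Bool.or_left_comm, Bool.or_assoc]

theorem dfs_spec : Claim_equal_dfs := by
  intro round teams _hdom hpre
  unfold Spec_dfs dfs dfs_alt
  have hr : round ≤ 15 := by
    rcases hpre with h | h
    · omega
    · omega
  rw [dfsB_eval (fuelW (15 - round).toNat) [(round, teams.map (fun row => row.map (fun x => x)))]
      (by intro p hp; simp only [List.mem_singleton] at hp; subst hp; exact hr)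
      (by simp [stackCost])]
  simp
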